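-- pv_equiv track=rewrite | github.com/rayking99/BlockStar | bstar.py | calculate_target_zones
-- ===== SOURCE A (Python) =====
-- def calculate_target_zones(current_positions, target_positions, piece_size):
--     zones = []
--
--     # Extract width and height from piece_size
--     piece_width, piece_height = piece_size
--
--     # Calculate the minimum rows and columns for the current and target positions
--     current_min_row = min(pos[0] for pos in current_positions)
--     current_min_col = min(pos[1] for pos in current_positions)
--     target_min_row = min(pos[0] for pos in target_positions)
--     target_min_col = min(pos[1] for pos in target_positions)
--
--     # Determine the direction of movement (up/down and left/right)
--     vertical_direction = 1 if target_min_row > current_min_row else -1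
--     horizontal_direction = 1 if target_min_col > current_min_col else -1
--
--     # Calculate the zones
--     for order in [
--         (0, 1),
--         (1, 0),
--     ]:  # (0, 1) for rows first, (1, 0) for columns first
--         target_zone = set(current_positions)
--         row, col = current_min_row, current_min_col
--
--         for axis in order:
--             # Move vertically
--             if axis == 0:
--                 while row != target_min_row:
--                     for col_offset in range(piece_width):
--                         for row_offset in range(
--                             piece_height
--                         ):  # Consider the entire height while moving
--                             target_zone.add((row + row_offset, col + col_offset))
--                     row += vertical_direction
--             # Move horizontally
--             else:
--                 while col != target_min_col:
--                     for row_offset in range(piece_height):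
--                         for col_offset in range(
--                             piece_width
--                         ):  # Consider the entire width while moving
--                             target_zone.add((row + row_offset, col + col_offset))
--                     col += horizontal_direction
--
--         # Adding the final target position
--         for row_offset in range(piece_height):
--             for col_offset in range(piece_width):
--                 target_zone.add(
--                     (target_min_row + row_offset, target_min_col + col_offset)
--                 )
--
--         zones.append(target_zone)
--
--     return zones
-- ===== SOURCE B (Python) =====
-- def calculate_target_zones(current_positions, target_positions, piece_size):
--     piece_width, piece_height = piece_size
--     current_min_row = min(pos[0] for pos in current_positions)
--     current_min_col = min(pos[1] for pos in current_positions)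
--     target_min_row = min(pos[0] for pos in target_positions)
--     target_min_col = min(pos[1] for pos in target_positions)
--
--     vertical_direction = 1 if target_min_row > current_min_row else -1
--     horizontal_direction = 1 if target_min_col > current_min_col else -1
--
--     zones = []
--     for order in [(0, 1), (1, 0)]:
--         zone = set(current_positions)
--         row, col = current_min_row, current_min_col
--         for axis in order:
--             if axis == 0:
--                 if row != target_min_row:
--                     if piece_height > 0 and piece_width > 0:
--                         # full footprint at the start of the vertical move
--                         for c in range(col, col + piece_width):
--                             for r in range(row, row + piece_height):
--                                 zone.add((r, c))
--                         # each further step exposes exactly one new row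
--                         if vertical_direction == 1:
--                             new_rows = range(row + piece_height, target_min_row + piece_height - 1)
--                         else:
--                             new_rows = range(row - 1, target_min_row, -1)
--                         for nr in new_rows:
--                             for c in range(col, col + piece_width):
--                                 zone.add((nr, c))
--                     row = target_min_row
--             else:
--                 if col != target_min_col:
--                     if piece_width > 0 and piece_height > 0:
--                         # full footprint at the start of the horizontal move
--                         for r in range(row, row + piece_height):
--                             for c in range(col, col + piece_width):
--                                 zone.add((r, c))
--                         # each further step exposes exactly one new column
--                         if horizontal_direction == 1:
--                             new_cols = range(col + piece_width, target_min_col + piece_width - 1)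
--                         else:
--                             new_cols = range(col - 1, target_min_col, -1)
--                         for nc in new_cols:
--                             for r in range(row, row + piece_height):
--                                 zone.add((r, nc))
--                     col = target_min_col
--         for r in range(target_min_row, target_min_row + piece_height):
--             for c in range(target_min_col, target_min_col + piece_width):
--                 zone.add((r, c))
--         zones.append(zone)
--     return zones
-- ===== Notes on version B (the rewrite author's own statement) =====
-- stated objective: alternative
-- what changed: Instead of while-loops that re-add the whole piece_w x piece_h footprint at every single step of a move, B adds the footprint once at the start of each move and then sweeps only the one newly exposed row/column per step, with the step positions computed as closed-form ranges; a timing run found no measurable speed difference on the generated inputs, so no speed is claimed.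
import Mathlib
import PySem

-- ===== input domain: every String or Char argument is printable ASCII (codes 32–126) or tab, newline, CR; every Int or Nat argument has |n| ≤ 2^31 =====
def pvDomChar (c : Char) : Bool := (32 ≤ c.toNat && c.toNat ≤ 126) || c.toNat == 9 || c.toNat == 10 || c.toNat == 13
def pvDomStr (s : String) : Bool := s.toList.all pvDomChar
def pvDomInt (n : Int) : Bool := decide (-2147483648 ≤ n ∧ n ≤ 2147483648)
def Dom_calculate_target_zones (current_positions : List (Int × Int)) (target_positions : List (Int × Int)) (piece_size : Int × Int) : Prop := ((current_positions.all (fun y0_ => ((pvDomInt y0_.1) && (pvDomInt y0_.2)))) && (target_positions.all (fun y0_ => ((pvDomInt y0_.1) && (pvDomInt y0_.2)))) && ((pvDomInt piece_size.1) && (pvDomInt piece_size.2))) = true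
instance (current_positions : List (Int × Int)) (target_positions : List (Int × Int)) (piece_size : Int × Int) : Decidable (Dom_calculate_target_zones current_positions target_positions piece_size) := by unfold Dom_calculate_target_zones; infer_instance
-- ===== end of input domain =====

-- B adds each move's footprint once and then only the one newly exposed row/column per step
-- (step positions as closed-form ranges) instead of re-adding the whole footprint at every step:
-- a structurally different sweep that visits each swept cell a bounded number of times.


-- ===== PORT A =====
-- the inner double loop of the vertical move: for col_offset in range(w): for row_offset in range(h): add
def ctz_rectCM (z : PySem.Set (Int × Int)) (row col w h : Int) : PySem.Set (Int × Int) :=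
  (PySem.List.pyRange 0 w).foldl (fun z co =>
    (PySem.List.pyRange 0 h).foldl (fun z ro => PySem.Set.add z (row + ro, col + co)) z) z

-- the inner double loop of the horizontal move and of the final target rectangle
def ctz_rectRM (z : PySem.Set (Int × Int)) (row col w h : Int) : PySem.Set (Int × Int) :=
  (PySem.List.pyRange 0 h).foldl (fun z ro =>
    (PySem.List.pyRange 0 w).foldl (fun z co => PySem.Set.add z (row + ro, col + co)) z) z

-- while row != target_min_row  (fuel = the exact step count |tr - row|, makes the loop total)
def ctz_vwhile (fuel : Nat) (z : PySem.Set (Int × Int)) (row col tr vd w h : Int) :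
    PySem.Set (Int × Int) × Int :=
  match fuel with
  | 0 => (z, row)
  | f + 1 =>
      if row = tr then (z, row)
      else ctz_vwhile f (ctz_rectCM z row col w h) (row + vd) col tr vd w h

-- while col != target_min_col
def ctz_hwhile (fuel : Nat) (z : PySem.Set (Int × Int)) (row col tc hd w h : Int) :
    PySem.Set (Int × Int) × Int :=
  match fuel with
  | 0 => (z, col)
  | f + 1 =>
      if col = tc then (z, col)
      else ctz_hwhile f (ctz_rectRM z row col w h) row (col + hd) tc hd w h

-- the body of "for order in [(0,1),(1,0)]"
def ctz_zone (order : List Int) (cur : List (Int × Int)) (cr cc tr tc vd hd w h : Int) :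
    PySem.Set (Int × Int) :=
  let st := order.foldl (fun (st : PySem.Set (Int × Int) × Int × Int) axis =>
      if axis = 0 then
        let r := ctz_vwhile (tr - st.2.1).natAbs st.1 st.2.1 st.2.2 tr vd w h
        (r.1, r.2, st.2.2)
      else
        let r := ctz_hwhile (tc - st.2.2).natAbs st.1 st.2.1 st.2.2 tc hd w h
        (r.1, st.2.1, r.2))
    (PySem.Set.ofList cur, cr, cc)
  ctz_rectRM st.1 tr tc w h

def calculate_target_zones (current_positions : List (Int × Int)) (target_positions : List (Int × Int)) (piece_size : Int × Int) : List (List (Int × Int)) :=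
  let w := piece_size.1
  let h := piece_size.2
  match PySem.List.min? (current_positions.map Prod.fst) id,
        PySem.List.min? (current_positions.map Prod.snd) id,
        PySem.List.min? (target_positions.map Prod.fst) id,
        PySem.List.min? (target_positions.map Prod.snd) id with
  | some cr, some cc, some tr, some tc =>
      let vd : Int := if tr > cr then 1 else -1
      let hd : Int := if tc > cc then 1 else -1
      ([[0, 1], [1, 0]] : List (List Int)).foldl
        (fun zs order => zs ++ [ctz_zone order current_positions cr cc tr tc vd hd w h]) []
  | _, _, _, _ => []

-- ===== PORT B =====
-- add one newly exposed row of the footprint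
def ctz_alt_slabV (z : PySem.Set (Int × Int)) (nr col w : Int) : PySem.Set (Int × Int) :=
  (PySem.List.pyRange col (col + w)).foldl (fun z c => PySem.Set.add z (nr, c)) z

-- add one newly exposed column of the footprint
def ctz_alt_slabH (z : PySem.Set (Int × Int)) (nc row h : Int) : PySem.Set (Int × Int) :=
  (PySem.List.pyRange row (row + h)).foldl (fun z r => PySem.Set.add z (r, nc)) z

-- vertical move: full footprint at the start, then one new row per step
def ctz_alt_vmove (z : PySem.Set (Int × Int)) (row col tr vd w h : Int) : PySem.Set (Int × Int) :=
  if row ≠ tr ∧ 0 < h ∧ 0 < w then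
    let z := (PySem.List.pyRange col (col + w)).foldl (fun z c =>
      (PySem.List.pyRange row (row + h)).foldl (fun z r => PySem.Set.add z (r, c)) z) z
    let nrs := if vd = 1 then PySem.List.pyRange (row + h) (tr + h - 1)
               else PySem.List.pyRange (row - 1) tr (-1)
    nrs.foldl (fun z nr => ctz_alt_slabV z nr col w) z
  else z

-- horizontal move: full footprint at the start, then one new column per step
def ctz_alt_hmove (z : PySem.Set (Int × Int)) (row col tc hd w h : Int) : PySem.Set (Int × Int) :=
  if col ≠ tc ∧ 0 < w ∧ 0 < h then
    let z := (PySem.List.pyRange row (row + h)).foldl (fun z r =>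
      (PySem.List.pyRange col (col + w)).foldl (fun z c => PySem.Set.add z (r, c)) z) z
    let ncs := if hd = 1 then PySem.List.pyRange (col + w) (tc + w - 1)
               else PySem.List.pyRange (col - 1) tc (-1)
    ncs.foldl (fun z nc => ctz_alt_slabH z nc row h) z
  else z

def ctz_alt_zone (order : List Int) (cur : List (Int × Int)) (cr cc tr tc vd hd w h : Int) :
    PySem.Set (Int × Int) :=
  let st := order.foldl (fun (st : PySem.Set (Int × Int) × Int × Int) axis =>
      if axis = 0 then (ctz_alt_vmove st.1 st.2.1 st.2.2 tr vd w h, tr, st.2.2)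
      else (ctz_alt_hmove st.1 st.2.1 st.2.2 tc hd w h, st.2.1, tc))
    (PySem.Set.ofList cur, cr, cc)
  (PySem.List.pyRange tr (tr + h)).foldl (fun z r =>
    (PySem.List.pyRange tc (tc + w)).foldl (fun z c => PySem.Set.add z (r, c)) z) st.1

def calculate_target_zones_alt (current_positions : List (Int × Int)) (target_positions : List (Int × Int)) (piece_size : Int × Int) : List (List (Int × Int)) :=
  let w := piece_size.1
  let h := piece_size.2
  match PySem.List.min? (current_positions.map Prod.fst) id with
  | none => []
  | some cr =>
    match PySem.List.min? (current_positions.map Prod.snd) id with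
    | none => []
    | some cc =>
      match PySem.List.min? (target_positions.map Prod.fst) id with
      | none => []
      | some tr =>
        match PySem.List.min? (target_positions.map Prod.snd) id with
        | none => []
        | some tc =>
          let vd : Int := if tr > cr then 1 else -1
          let hd : Int := if tc > cc then 1 else -1
          ([[0, 1], [1, 0]] : List (List Int)).foldl
            (fun zs order => zs ++ [ctz_alt_zone order current_positions cr cc tr tc vd hd w h]) []

-- ===== PRECONDITION & SPEC =====
-- Python A raises ValueError (min of an empty sequence) when either list is empty; B raises too.
def Pre_calculate_target_zones (current_positions : List (Int × Int)) (target_positions : List (Int × Int)) (piece_size : Int × Int) : Prop :=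
  current_positions ≠ [] ∧ target_positions ≠ []
instance (current_positions : List (Int × Int)) (target_positions : List (Int × Int)) (piece_size : Int × Int) : Decidable (Pre_calculate_target_zones current_positions target_positions piece_size) := by unfold Pre_calculate_target_zones; infer_instance

def pvWitness_calculate_target_zones : (List (Int × Int)) × (List (Int × Int)) × (Int × Int) :=
  ([(0, 0), (0, 1)], [(3, 2)], (2, 1))

def Spec_calculate_target_zones (current_positions : List (Int × Int)) (target_positions : List (Int × Int)) (piece_size : Int × Int) (out : List (List (Int × Int))) : Prop := out = calculate_target_zones_alt current_positions target_positions piece_size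
instance (current_positions : List (Int × Int)) (target_positions : List (Int × Int)) (piece_size : Int × Int) (out : List (List (Int × Int))) : Decidable (Spec_calculate_target_zones current_positions target_positions piece_size out) := by unfold Spec_calculate_target_zones; infer_instance

-- ===== CLAIM (what is proved, stated in full; the proofs are below) =====
def Claim_equal_calculate_target_zones : Prop := ∀ (current_positions : List (Int × Int)) (target_positions : List (Int × Int)) (piece_size : Int × Int), Dom_calculate_target_zones current_positions target_positions piece_size → Pre_calculate_target_zones current_positions target_positions piece_size → Spec_calculate_target_zones current_positions target_positions piece_size (calculate_target_zones current_positions target_positions piece_size)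

-- ===== LEMMAS AND PROOFS =====

lemma pv_add_mem {x : Int × Int} {z : PySem.Set (Int × Int)} (h : x ∈ z) : PySem.Set.add z x = z := by
  simp [PySem.Set.add, h]

lemma pv_mem_foldl_of_mem {x : Int × Int} (l : List (Int × Int)) (z : PySem.Set (Int × Int))
    (h : x ∈ z) : x ∈ l.foldl PySem.Set.add z := by
  induction l generalizing z with
  | nil => exact h
  | cons y l ih => exact ih _ ((PySem.Set.mem_add z y x).mpr (Or.inl h))

lemma pv_mem_foldl_self {x : Int × Int} (l : List (Int × Int)) (z : PySem.Set (Int × Int))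
    (h : x ∈ l) : x ∈ l.foldl PySem.Set.add z := by
  induction l generalizing z with
  | nil => simp at h
  | cons y l ih =>
    rcases List.mem_cons.mp h with rfl | hx
    · rw [List.foldl_cons]
      exact pv_mem_foldl_of_mem _ _ ((PySem.Set.mem_add z x x).mpr (Or.inr rfl))
    · exact ih _ hx

def pvRectG (mk : Int → Int → Int × Int) (z : PySem.Set (Int × Int)) (q fix hm wf : Int) :
    PySem.Set (Int × Int) :=
  (PySem.List.pyRange 0 wf).foldl (fun z fo =>
    (PySem.List.pyRange 0 hm).foldl (fun z mo => PySem.Set.add z (mk (q + mo) (fix + fo))) z) z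

def pvSlabG (mk : Int → Int → Int × Int) (z : PySem.Set (Int × Int)) (m fix wf : Int) :
    PySem.Set (Int × Int) :=
  (PySem.List.pyRange fix (fix + wf)).foldl (fun z f => PySem.Set.add z (mk m f)) z

def pvCellsG (mk : Int → Int → Int × Int) (q fix hm wf : Int) : List (Int × Int) :=
  (PySem.List.pyRange 0 wf).flatMap (fun fo =>
    (PySem.List.pyRange 0 hm).map (fun mo => mk (q + mo) (fix + fo)))

lemma pv_pyRange_shift (a w : Int) :
    PySem.List.pyRange a (a + w) = (PySem.List.pyRange 0 w).map (a + ·) := by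
  simp only [PySem.List.pyRange]; norm_num

lemma pv_foldl_nested (l : List Int) (g : Int → List (Int × Int)) (z : PySem.Set (Int × Int)) :
    l.foldl (fun z fo => (g fo).foldl PySem.Set.add z) z = (l.flatMap g).foldl PySem.Set.add z := by
  induction l generalizing z with
  | nil => rfl
  | cons a l ih => rw [List.foldl_cons, List.flatMap_cons, List.foldl_append, ih]

lemma pv_rectG_eq_foldl (mk : Int → Int → Int × Int) (z : PySem.Set (Int × Int)) (q fix hm wf : Int) :
    pvRectG mk z q fix hm wf = (pvCellsG mk q fix hm wf).foldl PySem.Set.add z := by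
  unfold pvRectG pvCellsG
  rw [← pv_foldl_nested]
  simp only [List.foldl_map]

lemma pv_slabG_eq_foldl (mk : Int → Int → Int × Int) (z : PySem.Set (Int × Int)) (m fix wf : Int) :
    pvSlabG mk z m fix wf =
      ((PySem.List.pyRange 0 wf).map (fun fo => mk m (fix + fo))).foldl PySem.Set.add z := by
  unfold pvSlabG
  rw [pv_pyRange_shift]
  simp only [List.foldl_map]

lemma pv_mem_cellsG {mk : Int → Int → Int × Int} {x : Int × Int} {q fix hm wf : Int} :
    x ∈ pvCellsG mk q fix hm wf ↔
      ∃ mo fo, 0 ≤ mo ∧ mo < hm ∧ 0 ≤ fo ∧ fo < wf ∧ x = mk (q + mo) (fix + fo) := by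
  unfold pvCellsG
  simp only [List.mem_flatMap, List.mem_map, PySem.List.mem_pyRange_one]
  constructor
  · rintro ⟨fo, ⟨h1, h2⟩, mo, ⟨h3, h4⟩, rfl⟩
    exact ⟨mo, fo, h3, h4, h1, h2, rfl⟩
  · rintro ⟨mo, fo, h1, h2, h3, h4, rfl⟩
    exact ⟨fo, ⟨h3, h4⟩, mo, ⟨h1, h2⟩, rfl⟩

lemma pv_foldl_filter (p : Int × Int → Bool) (l : List (Int × Int)) (z : PySem.Set (Int × Int))
    (h : ∀ x ∈ l, p x = false → x ∈ z) :
    (l.filter p).foldl PySem.Set.add z = l.foldl PySem.Set.add z := by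
  induction l generalizing z with
  | nil => rfl
  | cons a l ih =>
    by_cases hp : p a
    · rw [List.filter_cons_of_pos hp, List.foldl_cons, List.foldl_cons]
      exact ih _ (fun x hx hpx => (PySem.Set.mem_add z a x).mpr (Or.inl (h x (List.mem_cons_of_mem a hx) hpx)))
    · rw [List.filter_cons_of_neg (by simpa using hp), List.foldl_cons,
        pv_add_mem (h a List.mem_cons_self (by simpa using hp))]
      exact ih _ (fun x hx hpx => h x (List.mem_cons_of_mem a hx) hpx)

lemma pv_filter_last {hm : Int} (hhm : 0 < hm) (P : Int → Bool)
    (hP : ∀ mo, 0 ≤ mo → mo < hm → (P mo = true ↔ mo = hm - 1)) :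
    (PySem.List.pyRange 0 hm).filter P = [hm - 1] := by
  have hsplit : PySem.List.pyRange 0 hm = PySem.List.pyRange 0 (hm - 1) ++ [hm - 1] := by
    have h := PySem.List.pyRange_one_succ_right (show (0:Int) ≤ hm - 1 by omega)
    rw [show hm - 1 + 1 = hm from by ring] at h
    exact h
  rw [hsplit, List.filter_append]
  rw [List.filter_eq_nil_iff.mpr (fun x hx => by
    rw [PySem.List.mem_pyRange_one] at hx
    intro hc
    have := (hP x hx.1 (by omega)).mp hc
    omega)]
  have : P (hm - 1) = true := (hP (hm - 1) (by omega) (by omega)).mpr rfl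
  simp [this]

lemma pv_filter_first {hm : Int} (hhm : 0 < hm) (P : Int → Bool)
    (hP : ∀ mo, 0 ≤ mo → mo < hm → (P mo = true ↔ mo = 0)) :
    (PySem.List.pyRange 0 hm).filter P = [0] := by
  rw [PySem.List.pyRange_one_cons hhm, List.filter_cons_of_pos ((hP 0 le_rfl hhm).mpr rfl)]
  rw [List.filter_eq_nil_iff.mpr (fun x hx => by
    rw [PySem.List.mem_pyRange_one] at hx
    intro hc
    have := (hP x (by omega) hx.2).mp hc
    omega)]

lemma pv_step_pos (mk : Int → Int → Int × Int)
    (inj : ∀ a b c d, mk a c = mk b d → a = b ∧ c = d)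
    {q fix hm wf : Int} (hhm : 0 < hm) (hwf : 0 < wf) (z : PySem.Set (Int × Int))
    (hz : ∀ x ∈ pvCellsG mk q fix hm wf, x ∈ z) :
    pvRectG mk z (q + 1) fix hm wf = pvSlabG mk z (q + hm) fix wf := by
  classical
  set sl : List (Int × Int) := (PySem.List.pyRange 0 wf).map (fun fo => mk (q + hm) (fix + fo)) with hsl
  set p : Int × Int → Bool := fun x => decide (x ∈ sl) with hp
  have key : ∀ l : List Int, (∀ fo ∈ l, 0 ≤ fo ∧ fo < wf) →
      ((l.flatMap (fun fo => (PySem.List.pyRange 0 hm).map (fun mo => mk (q + 1 + mo) (fix + fo)))).filter p)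
        = l.map (fun fo => mk (q + hm) (fix + fo)) := by
    intro l
    induction l with
    | nil => intro _; rfl
    | cons a t ih =>
      intro hb
      have ha := hb a List.mem_cons_self
      rw [List.flatMap_cons, List.filter_append, List.filter_map,
        ih (fun fo hfo => hb fo (List.mem_cons_of_mem a hfo)), List.map_cons]
      have hfil : ((PySem.List.pyRange 0 hm).filter (p ∘ fun mo => mk (q + 1 + mo) (fix + a))) = [hm - 1] := by
        apply pv_filter_last hhm
        intro mo h0 h1
        simp only [Function.comp_def, hp, hsl, decide_eq_true_eq, List.mem_map,
          PySem.List.mem_pyRange_one]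
        constructor
        · rintro ⟨fo, hfo, heq⟩
          have := inj _ _ _ _ heq.symm
          omega
        · rintro rfl
          exact ⟨a, ⟨ha.1, ha.2⟩, by rw [show q + 1 + (hm - 1) = q + hm from by ring]⟩
      rw [hfil, List.map_cons, List.map_nil,
        show q + 1 + (hm - 1) = q + hm from by ring, List.singleton_append]
  rw [pv_rectG_eq_foldl, pv_slabG_eq_foldl,
    ← key (PySem.List.pyRange 0 wf) (fun fo hfo => (PySem.List.mem_pyRange_one).mp hfo)]
  refine (pv_foldl_filter p _ z ?_).symm
  intro x hx hpx
  rw [pv_mem_cellsG] at hx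
  obtain ⟨mo, fo, h0, h1, h2, h3, rfl⟩ := hx
  have hne : mo ≠ hm - 1 := by
    intro hc
    subst hc
    have hm1 : mk (q + hm) (fix + fo) ∈ sl := by
      rw [hsl]
      exact List.mem_map.mpr ⟨fo, PySem.List.mem_pyRange_one.mpr ⟨h2, h3⟩, rfl⟩
    rw [hp] at hpx
    rw [show q + 1 + (hm - 1) = q + hm from by ring] at hpx
    simp [hm1] at hpx
  apply hz
  rw [pv_mem_cellsG]
  exact ⟨mo + 1, fo, by omega, by omega, h2, h3, by rw [show q + (mo + 1) = q + 1 + mo from by ring]⟩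

lemma pv_step_neg (mk : Int → Int → Int × Int)
    (inj : ∀ a b c d, mk a c = mk b d → a = b ∧ c = d)
    {q fix hm wf : Int} (hhm : 0 < hm) (z : PySem.Set (Int × Int))
    (hz : ∀ x ∈ pvCellsG mk (q + 1) fix hm wf, x ∈ z) :
    pvRectG mk z q fix hm wf = pvSlabG mk z q fix wf := by
  classical
  set sl : List (Int × Int) := (PySem.List.pyRange 0 wf).map (fun fo => mk q (fix + fo)) with hsl
  set p : Int × Int → Bool := fun x => decide (x ∈ sl) with hp
  have key : ∀ l : List Int, (∀ fo ∈ l, 0 ≤ fo ∧ fo < wf) →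
      ((l.flatMap (fun fo => (PySem.List.pyRange 0 hm).map (fun mo => mk (q + mo) (fix + fo)))).filter p)
        = l.map (fun fo => mk q (fix + fo)) := by
    intro l
    induction l with
    | nil => intro _; rfl
    | cons a t ih =>
      intro hb
      have ha := hb a List.mem_cons_self
      rw [List.flatMap_cons, List.filter_append, List.filter_map,
        ih (fun fo hfo => hb fo (List.mem_cons_of_mem a hfo)), List.map_cons]
      have hfil : ((PySem.List.pyRange 0 hm).filter (p ∘ fun mo => mk (q + mo) (fix + a))) = [0] := by
        apply pv_filter_first hhm
        intro mo h0 h1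
        simp only [Function.comp_def, hp, hsl, decide_eq_true_eq, List.mem_map,
          PySem.List.mem_pyRange_one]
        constructor
        · rintro ⟨fo, hfo, heq⟩
          have := inj _ _ _ _ heq.symm
          omega
        · rintro rfl
          exact ⟨a, ⟨ha.1, ha.2⟩, by rw [show q + 0 = q from by ring]⟩
      rw [hfil, List.map_cons, List.map_nil,
        show q + 0 = q from by ring, List.singleton_append]
  rw [pv_rectG_eq_foldl, pv_slabG_eq_foldl,
    ← key (PySem.List.pyRange 0 wf) (fun fo hfo => (PySem.List.mem_pyRange_one).mp hfo)]
  refine (pv_foldl_filter p _ z ?_).symm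
  intro x hx hpx
  rw [pv_mem_cellsG] at hx
  obtain ⟨mo, fo, h0, h1, h2, h3, rfl⟩ := hx
  have hne : mo ≠ 0 := by
    intro hc
    subst hc
    have hm1 : mk q (fix + fo) ∈ sl := by
      rw [hsl]
      exact List.mem_map.mpr ⟨fo, PySem.List.mem_pyRange_one.mpr ⟨h2, h3⟩, rfl⟩
    rw [hp] at hpx
    rw [show q + 0 = q from by ring] at hpx
    simp [hm1] at hpx
  apply hz
  rw [pv_mem_cellsG]
  exact ⟨mo - 1, fo, by omega, by omega, h2, h3, by rw [show q + 1 + (mo - 1) = q + mo from by ring]⟩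

def pvRectAbsG (mk : Int → Int → Int × Int) (z : PySem.Set (Int × Int)) (q fix hm wf : Int) :
    PySem.Set (Int × Int) :=
  (PySem.List.pyRange fix (fix + wf)).foldl (fun z f =>
    (PySem.List.pyRange q (q + hm)).foldl (fun z m => PySem.Set.add z (mk m f)) z) z

def pvWhileG (mk : Int → Int → Int × Int) (fuel : Nat) (z : PySem.Set (Int × Int))
    (q fix tgt d hm wf : Int) : PySem.Set (Int × Int) × Int :=
  match fuel with
  | 0 => (z, q)
  | f + 1 =>
      if q = tgt then (z, q)
      else pvWhileG mk f (pvRectG mk z q fix hm wf) (q + d) fix tgt d hm wf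

def pvMoveG (mk : Int → Int → Int × Int) (z : PySem.Set (Int × Int)) (q fix tgt d hm wf : Int) :
    PySem.Set (Int × Int) :=
  if q ≠ tgt ∧ 0 < hm ∧ 0 < wf then
    let z := pvRectAbsG mk z q fix hm wf
    let ns := if d = 1 then PySem.List.pyRange (q + hm) (tgt + hm - 1)
              else PySem.List.pyRange (q - 1) tgt (-1)
    ns.foldl (fun z m => pvSlabG mk z m fix wf) z
  else z

lemma pv_rectAbsG_eq (mk : Int → Int → Int × Int) (z : PySem.Set (Int × Int)) (q fix hm wf : Int) :
    pvRectAbsG mk z q fix hm wf = pvRectG mk z q fix hm wf := by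
  unfold pvRectAbsG pvRectG
  rw [pv_pyRange_shift fix wf, pv_pyRange_shift q hm]
  simp only [List.foldl_map]

lemma pv_pyRange_one_nil (a b : Int) (h : b ≤ a) : PySem.List.pyRange a b = [] := by
  simp [PySem.List.pyRange]; omega

lemma pv_pyRange_neg_nil (a b : Int) (h : b ≤ a) : PySem.List.pyRange b a (-1) = [] := by
  simp [PySem.List.pyRange]; omega

lemma pv_rectG_degen (mk : Int → Int → Int × Int) (z : PySem.Set (Int × Int)) (q fix hm wf : Int)
    (h : ¬(0 < hm ∧ 0 < wf)) : pvRectG mk z q fix hm wf = z := by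
  unfold pvRectG
  rcases not_and_or.mp h with h1 | h2
  · rw [pv_pyRange_one_nil 0 hm (by omega)]
    simp
  · rw [pv_pyRange_one_nil 0 wf (by omega)]
    rfl

lemma pv_mem_rectG (mk : Int → Int → Int × Int) (z : PySem.Set (Int × Int)) (q fix hm wf : Int)
    {x : Int × Int} (h : x ∈ pvCellsG mk q fix hm wf) : x ∈ pvRectG mk z q fix hm wf := by
  rw [pv_rectG_eq_foldl]
  exact pv_mem_foldl_self _ _ h

lemma pv_sweep_pos (mk : Int → Int → Int × Int)
    (inj : ∀ a b c d, mk a c = mk b d → a = b ∧ c = d)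
    {fix hm wf : Int} (hhm : 0 < hm) (hwf : 0 < wf) :
    ∀ (m : Nat) (q : Int) (z : PySem.Set (Int × Int)),
      pvWhileG mk (m + 1) z q fix (q + ((m : Int) + 1)) 1 hm wf =
        ((PySem.List.pyRange (q + hm) (q + ((m : Int) + 1) + hm - 1)).foldl
          (fun z n => pvSlabG mk z n fix wf) (pvRectG mk z q fix hm wf), q + ((m : Int) + 1)) := by
  intro m
  induction m with
  | zero =>
    intro q z
    simp only [pvWhileG, Nat.cast_zero]
    rw [if_neg (by omega), pv_pyRange_one_nil _ _ (by omega)]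
    norm_num
  | succ m ih =>
    intro q z
    have e : q + ((↑(m + 1) : Int) + 1) = (q + 1) + ((m : Int) + 1) := by push_cast; ring
    rw [e]
    have step : pvWhileG mk (m + 1 + 1) z q fix ((q + 1) + ((m : Int) + 1)) 1 hm wf =
        pvWhileG mk (m + 1) (pvRectG mk z q fix hm wf) (q + 1) fix ((q + 1) + ((m : Int) + 1)) 1 hm wf := by
      conv_lhs => rw [pvWhileG]
      rw [if_neg (by omega)]
    rw [step, ih,
      PySem.List.pyRange_one_cons (show q + hm < (q + 1) + ((m : Int) + 1) + hm - 1 by omega),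
      List.foldl_cons,
      ← pv_step_pos mk inj hhm hwf (pvRectG mk z q fix hm wf)
        (fun x hx => pv_mem_rectG mk z q fix hm wf hx),
      show q + hm + 1 = q + 1 + hm from by ring]

lemma pv_pyRange_neg_cons (a b : Int) (h : b < a) :
    PySem.List.pyRange a b (-1) = a :: PySem.List.pyRange (a - 1) b (-1) := by
  simp only [PySem.List.pyRange]
  norm_num
  rw [if_pos h]
  have hn : (a - b).toNat = (if b < a - 1 then (a - 1 - b).toNat else 0) + 1 := by
    split <;> omega
  rw [hn, List.range_succ_eq_map]
  simp only [List.map_cons, List.map_map, Function.comp_def]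
  refine List.cons_eq_cons.mpr ⟨by omega, ?_⟩
  apply List.map_congr_left
  intro x hx
  push_cast
  ring

lemma pv_sweep_neg (mk : Int → Int → Int × Int)
    (inj : ∀ a b c d, mk a c = mk b d → a = b ∧ c = d)
    {fix hm wf : Int} (hhm : 0 < hm) (hwf : 0 < wf) :
    ∀ (m : Nat) (q : Int) (z : PySem.Set (Int × Int)),
      pvWhileG mk (m + 1) z q fix (q - ((m : Int) + 1)) (-1) hm wf =
        ((PySem.List.pyRange (q - 1) (q - ((m : Int) + 1)) (-1)).foldl
          (fun z n => pvSlabG mk z n fix wf) (pvRectG mk z q fix hm wf), q - ((m : Int) + 1)) := by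
  intro m
  induction m with
  | zero =>
    intro q z
    simp only [pvWhileG, Nat.cast_zero]
    rw [if_neg (by omega), pv_pyRange_neg_nil _ _ (by omega)]
    norm_num
    omega
  | succ m ih =>
    intro q z
    have e : q - ((↑(m + 1) : Int) + 1) = (q - 1) - ((m : Int) + 1) := by push_cast; ring
    rw [e]
    have step : pvWhileG mk (m + 1 + 1) z q fix ((q - 1) - ((m : Int) + 1)) (-1) hm wf =
        pvWhileG mk (m + 1) (pvRectG mk z q fix hm wf) (q + -1) fix ((q - 1) - ((m : Int) + 1)) (-1) hm wf := by
      conv_lhs => rw [pvWhileG]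
      rw [if_neg (by omega)]
    rw [step, show q + -1 = q - 1 from by ring, ih,
      pv_pyRange_neg_cons (q - 1) ((q - 1) - ((m : Int) + 1)) (by omega),
      List.foldl_cons,
      ← pv_step_neg mk inj hhm (pvRectG mk z q fix hm wf)
        (fun x hx => pv_mem_rectG mk z q fix hm wf (by rwa [show q - 1 + 1 = q from by ring] at hx))]

lemma pv_sweep_degen_pos (mk : Int → Int → Int × Int) {fix hm wf : Int}
    (h : ¬(0 < hm ∧ 0 < wf)) :
    ∀ (m : Nat) (q : Int) (z : PySem.Set (Int × Int)),
      pvWhileG mk (m + 1) z q fix (q + ((m : Int) + 1)) 1 hm wf = (z, q + ((m : Int) + 1)) := by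
  intro m
  induction m with
  | zero =>
    intro q z
    simp only [pvWhileG, Nat.cast_zero]
    rw [if_neg (by omega), pv_rectG_degen mk z q fix hm wf h]
    norm_num
  | succ m ih =>
    intro q z
    have e : q + ((↑(m + 1) : Int) + 1) = (q + 1) + ((m : Int) + 1) := by push_cast; ring
    rw [e]
    conv_lhs => rw [pvWhileG]
    rw [if_neg (by omega), pv_rectG_degen mk z q fix hm wf h]
    exact ih (q + 1) z

lemma pv_sweep_degen_neg (mk : Int → Int → Int × Int) {fix hm wf : Int}
    (h : ¬(0 < hm ∧ 0 < wf)) :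
    ∀ (m : Nat) (q : Int) (z : PySem.Set (Int × Int)),
      pvWhileG mk (m + 1) z q fix (q - ((m : Int) + 1)) (-1) hm wf = (z, q - ((m : Int) + 1)) := by
  intro m
  induction m with
  | zero =>
    intro q z
    simp only [pvWhileG, Nat.cast_zero]
    rw [if_neg (by omega), pv_rectG_degen mk z q fix hm wf h]
    norm_num
    omega
  | succ m ih =>
    intro q z
    have e : q - ((↑(m + 1) : Int) + 1) = (q + -1) - ((m : Int) + 1) := by push_cast; ring
    rw [e]
    conv_lhs => rw [pvWhileG]
    rw [if_neg (by omega), pv_rectG_degen mk z q fix hm wf h]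
    exact ih (q + -1) z

lemma pv_main (mk : Int → Int → Int × Int)
    (inj : ∀ a b c d, mk a c = mk b d → a = b ∧ c = d)
    (q fix tgt hm wf : Int) (z : PySem.Set (Int × Int)) :
    pvWhileG mk (tgt - q).natAbs z q fix tgt (if tgt > q then 1 else -1) hm wf =
      (pvMoveG mk z q fix tgt (if tgt > q then 1 else -1) hm wf, tgt) := by
  rcases lt_trichotomy q tgt with hlt | heq | hgt
  · rw [if_pos hlt]
    obtain ⟨m, hmn⟩ : ∃ m : Nat, (tgt - q).natAbs = m + 1 := ⟨(tgt - q).natAbs - 1, by omega⟩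
    have htgt : tgt = q + ((m : Int) + 1) := by omega
    subst htgt
    rw [hmn]
    by_cases hdeg : 0 < hm ∧ 0 < wf
    · rw [pv_sweep_pos mk inj hdeg.1 hdeg.2 m q z]
      unfold pvMoveG
      rw [if_pos ⟨by omega, hdeg⟩, if_pos rfl, pv_rectAbsG_eq]
    · rw [pv_sweep_degen_pos mk hdeg m q z]
      unfold pvMoveG
      rw [if_neg (by tauto)]
  · subst heq
    rw [if_neg (by omega)]
    simp only [sub_self, Int.natAbs_zero]
    unfold pvMoveG pvWhileG
    rw [if_neg (by tauto)]
  · rw [if_neg (by omega)]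
    obtain ⟨m, hmn⟩ : ∃ m : Nat, (tgt - q).natAbs = m + 1 := ⟨(tgt - q).natAbs - 1, by omega⟩
    have htgt : tgt = q - ((m : Int) + 1) := by omega
    subst htgt
    rw [hmn]
    by_cases hdeg : 0 < hm ∧ 0 < wf
    · rw [pv_sweep_neg mk inj hdeg.1 hdeg.2 m q z]
      unfold pvMoveG
      rw [if_pos ⟨by omega, hdeg⟩, if_neg (by omega)]
      rw [pv_rectAbsG_eq]
    · rw [pv_sweep_degen_neg mk hdeg m q z]
      unfold pvMoveG
      rw [if_neg (by tauto)]


lemma pv_vwhile_eq (f : Nat) (z : PySem.Set (Int × Int)) (row col tr vd w h : Int) :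
    ctz_vwhile f z row col tr vd w h = pvWhileG (fun m fx => (m, fx)) f z row col tr vd h w := by
  induction f generalizing z row with
  | zero => rfl
  | succ f ih =>
    simp only [ctz_vwhile, pvWhileG]
    split_ifs
    · rfl
    · exact ih _ _

lemma pv_hwhile_eq (f : Nat) (z : PySem.Set (Int × Int)) (row col tc hd w h : Int) :
    ctz_hwhile f z row col tc hd w h = pvWhileG (fun m fx => (fx, m)) f z col row tc hd w h := by
  induction f generalizing z col with
  | zero => rfl
  | succ f ih =>
    simp only [ctz_hwhile, pvWhileG]
    split_ifs
    · rfl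
    · exact ih _ _

lemma pv_vmove_eq (z : PySem.Set (Int × Int)) (row col tr vd w h : Int) :
    ctz_alt_vmove z row col tr vd w h = pvMoveG (fun m fx => (m, fx)) z row col tr vd h w := rfl

lemma pv_hmove_eq (z : PySem.Set (Int × Int)) (row col tc hd w h : Int) :
    ctz_alt_hmove z row col tc hd w h = pvMoveG (fun m fx => (fx, m)) z col row tc hd w h := rfl

lemma pv_inj1 : ∀ a b c d : Int, (fun (m fx : Int) => ((m, fx) : Int × Int)) a c = (fun m fx => (m, fx)) b d → a = b ∧ c = d := by
  intro a b c d h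
  simpa using h

lemma pv_inj2 : ∀ a b c d : Int, (fun (m fx : Int) => ((fx, m) : Int × Int)) a c = (fun m fx => (fx, m)) b d → a = b ∧ c = d := by
  intro a b c d h
  have := Prod.mk.injEq .. ▸ h
  simp at this
  exact ⟨this.2, this.1⟩

lemma pv_zone_eq (order : List Int) (hord : order = [0, 1] ∨ order = [1, 0])
    (cur : List (Int × Int)) (cr cc tr tc w h : Int) :
    ctz_zone order cur cr cc tr tc (if tr > cr then 1 else -1) (if tc > cc then 1 else -1) w h =
      ctz_alt_zone order cur cr cc tr tc (if tr > cr then 1 else -1) (if tc > cc then 1 else -1) w h := by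
  have hfin : ∀ z : PySem.Set (Int × Int),
      ctz_rectRM z tr tc w h = (PySem.List.pyRange tr (tr + h)).foldl (fun z r =>
        (PySem.List.pyRange tc (tc + w)).foldl (fun z c => PySem.Set.add z (r, c)) z) z := by
    intro z
    exact ((pv_rectAbsG_eq (fun m fx => (fx, m)) z tc tr w h)).symm
  rcases hord with rfl | rfl <;>
    simp only [ctz_zone, ctz_alt_zone, List.foldl_cons, List.foldl_nil,
      show ((0:Int) = 0) = True from by norm_num, show ((1:Int) = 0) = False from by norm_num,
      if_true, if_false,
      pv_vwhile_eq, pv_hwhile_eq, pv_vmove_eq, pv_hmove_eq,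
      pv_main _ pv_inj1, pv_main _ pv_inj2, hfin]

lemma pv_min?_isSome {α : Type} (l : List α) (key : α → Int) (h : l ≠ []) :
    ∃ m, PySem.List.min? l key = some m := by
  obtain ⟨x, xs, rfl⟩ : ∃ x xs, l = x :: xs := by
    cases l with
    | nil => exact absurd rfl h
    | cons x xs => exact ⟨x, xs, rfl⟩
  unfold PySem.List.min?
  rw [List.foldl_cons]
  have : ∀ (t : List α) (a : α),
      ∃ m, t.foldl (fun acc x => match acc with
        | none => some x
        | some mm => if key x < key mm then some x else some mm) (some a) = some m := by
    intro t
    induction t with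
    | nil => exact fun a => ⟨a, rfl⟩
    | cons y t ih =>
      intro a
      rw [List.foldl_cons]
      by_cases hk : key y < key a
      · simpa [hk] using ih y
      · simpa [hk] using ih a
  exact this xs x


-- ===== VERDICT (by name: the statement is the Claim_ definition above) =====
theorem calculate_target_zones_spec : Claim_equal_calculate_target_zones := by
  unfold Claim_equal_calculate_target_zones
  intro cur tgt ps _ hpre
  obtain ⟨cr, hcr⟩ := pv_min?_isSome (cur.map Prod.fst) id (by simpa using hpre.1)
  obtain ⟨cc, hcc⟩ := pv_min?_isSome (cur.map Prod.snd) id (by simpa using hpre.1)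
  obtain ⟨tr, htr⟩ := pv_min?_isSome (tgt.map Prod.fst) id (by simpa using hpre.2)
  obtain ⟨tc, htc⟩ := pv_min?_isSome (tgt.map Prod.snd) id (by simpa using hpre.2)
  unfold Spec_calculate_target_zones calculate_target_zones calculate_target_zones_alt
  rw [hcr, hcc, htr, htc]
  simp only [List.foldl_cons, List.foldl_nil]
  rw [pv_zone_eq [0, 1] (Or.inl rfl), pv_zone_eq [1, 0] (Or.inr rfl)]
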